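-- pv_equiv track=rewrite | github.com/GanschowJosh/Kattis | Two Charts Become One.py | parse_chart
-- ===== SOURCE A (Python) =====
-- from collections import defaultdict
--
-- def next_int(it, chart_string):
--     """Read an integer from the string iterator."""
--     x = 0
--     while it < len(chart_string) and chart_string[it].isdigit():
--         x = x * 10 + int(chart_string[it])
--         it += 1
--     return x, it
--
-- def parse_chart(chart_string):
--     """Parse a chart string into a hierarchy."""
--     it = 0
--     org = defaultdict(set)
--     roots = []
--
--     head = next_int(it, chart_string)[0]
--     roots.append(head)
--     org[head] = set()
--
--     it = next_int(it, chart_string)[1]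
--
--     while it < len(chart_string):
--         char = chart_string[it]
--
--         if char == ' ':
--             it += 1
--         elif char == '(':
--             it += 1
--         elif char == ')':
--             it += 1
--             roots.pop()
--         else:  # The default case: a department number
--             x, it = next_int(it, chart_string)
--             org[roots[-1]].add(x)  # Add the child to the current root
--             roots.append(x)  # Move to the new department
--
--     return head, org
-- ===== SOURCE B (Python) =====
-- def parse_chart(chart_string):
--     """Parse a chart string into a hierarchy (recursive descent)."""
--     n = len(chart_string)
--
--     def read_int(i):
--         x = 0
--         while i < n and chart_string[i].isdigit():
--             x = x * 10 + (ord(chart_string[i]) - 48)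
--             i += 1
--         return x, i
--
--     org = {}
--
--     def children(parent, i):
--         while i < n:
--             c = chart_string[i]
--             if c == ')':
--                 return i + 1
--             if c.isdigit():
--                 x, i = read_int(i)
--                 org.setdefault(parent, set()).add(x)
--                 i = children(x, i)
--             else:
--                 i += 1
--         return i
--
--     head, i = read_int(0)
--     org[head] = set()
--     children(head, i)
--     return head, org
-- ===== Notes on version B (the rewrite author's own statement) =====
-- stated objective: alternative
-- what changed: A runs one flat while-loop that maintains an explicit root stack (append on every number, pop on every ')'); B is a recursive-descent parser over a shared index whose call stack replaces A's explicit roots list, and which records children via dict.setdefault instead of defaultdict access.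
import Mathlib
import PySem

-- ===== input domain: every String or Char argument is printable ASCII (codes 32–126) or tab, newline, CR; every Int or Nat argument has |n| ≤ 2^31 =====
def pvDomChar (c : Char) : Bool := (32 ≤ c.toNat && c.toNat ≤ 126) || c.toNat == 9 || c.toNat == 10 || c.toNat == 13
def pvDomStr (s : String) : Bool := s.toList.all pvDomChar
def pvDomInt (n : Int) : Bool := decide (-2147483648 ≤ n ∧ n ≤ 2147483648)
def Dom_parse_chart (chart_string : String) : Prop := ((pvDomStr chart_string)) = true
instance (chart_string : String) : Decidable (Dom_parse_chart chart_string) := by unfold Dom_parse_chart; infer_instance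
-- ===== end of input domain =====

-- B replaces A's explicit root-stack loop by recursive descent over a shared index (same cost; objective: alternative decomposition).


-- ===== PORT A =====
-- next_int: read a decimal run starting at `it` (x is the accumulator, 0 at the call site)
def nextInt (cs : List Char) (x : Int) (it : Nat) : Int × Nat :=
  if h : it < cs.length ∧ (cs.getD it ' ').isDigit then
    nextInt cs (x * 10 + ((cs.getD it ' ').toNat - 48 : Nat)) (it + 1)
  else (x, it)
termination_by cs.length - it
decreasing_by exact Nat.sub_lt_sub_left h.1 (Nat.lt_succ_self it)

-- A's while-loop over (it, org, roots).  Where the Python raises (pop / roots[-1] on an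
-- empty stack) or loops forever (a character that is no digit and no ' '/'('/')', on which
-- next_int makes no progress) the port just returns the current org: those inputs are
-- excluded by Pre_parse_chart.
def loopA (cs : List Char) (it : Nat) (org : PySem.Dict Int (PySem.Set Int))
    (roots : List Int) : PySem.Dict Int (PySem.Set Int) :=
  if h : it < cs.length then
    if cs.getD it ' ' = ' ' then loopA cs (it + 1) org roots
    else if cs.getD it ' ' = '(' then loopA cs (it + 1) org roots
    else if cs.getD it ' ' = ')' then loopA cs (it + 1) org roots.dropLast
    else
      if h2 : it < (nextInt cs 0 it).2 then
        match roots.getLast? with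
        | some p =>
            loopA cs (nextInt cs 0 it).2
              (org.insert p (PySem.Set.add (org.getD p PySem.Set.empty) (nextInt cs 0 it).1))
              (roots ++ [(nextInt cs 0 it).1])
        | none => org      -- Python: IndexError (outside Pre_)
      else org             -- Python: infinite loop (outside Pre_)
  else org
termination_by cs.length - it
decreasing_by
  · exact Nat.sub_lt_sub_left h (Nat.lt_succ_self it)
  · exact Nat.sub_lt_sub_left h (Nat.lt_succ_self it)
  · exact Nat.sub_lt_sub_left h (Nat.lt_succ_self it)
  · exact Nat.sub_lt_sub_left h h2

def parse_chart (chart_string : String) : Int × (List (Int × List Int)) :=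
  let cs := chart_string.toList
  let head := (nextInt cs 0 0).1
  let org : PySem.Dict Int (PySem.Set Int) := PySem.Dict.empty.insert head PySem.Set.empty
  let it := (nextInt cs 0 0).2
  (head, (loopA cs it org [head]).items)

-- ===== PORT B =====
-- Source B read_int
def readIntB (cs : List Char) (x : Int) (i : Nat) : Int × Nat :=
  if h : i < cs.length ∧ (cs.getD i ' ').isDigit then
    readIntB cs (x * 10 + ((cs.getD i ' ').toNat - 48 : Nat)) (i + 1)
  else (x, i)
termination_by cs.length - i
decreasing_by exact Nat.sub_lt_sub_left h.1 (Nat.lt_succ_self i)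

theorem readIntB_le (cs : List Char) (x : Int) (i : Nat) : i ≤ (readIntB cs x i).2 := by
  fun_induction readIntB with
  | case1 x i h ih => exact le_trans (Nat.le_succ i) ih
  | case2 x i h => exact le_refl i

theorem readIntB_lt (cs : List Char) (x : Int) (i : Nat) (h1 : i < cs.length)
    (h2 : (cs.getD i ' ').isDigit) : i < (readIntB cs x i).2 := by
  rw [readIntB]
  simp only [h1, h2, and_self]
  exact lt_of_lt_of_le (Nat.lt_succ_self i) (readIntB_le cs _ (i + 1))

-- Source B children(parent, i): returns the final index together with i ≤ result (used for termination).
def childrenB (cs : List Char) (parent : Int) (i : Nat)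
    (org : PySem.Dict Int (PySem.Set Int)) :
    {p : PySem.Dict Int (PySem.Set Int) × Nat // i ≤ p.2} :=
  if h : i < cs.length then
    if _hc : cs.getD i ' ' = ')' then ⟨(org, i + 1), Nat.le_succ i⟩
    else if hd : (cs.getD i ' ').isDigit then
      have hlt : i < (readIntB cs 0 i).2 := readIntB_lt cs 0 i h hd
      let inner := childrenB cs (readIntB cs 0 i).1 (readIntB cs 0 i).2
        (org.modify parent PySem.Set.empty (fun s => PySem.Set.add s (readIntB cs 0 i).1))
      let cont := childrenB cs parent inner.val.2 inner.val.1
      ⟨cont.val, le_of_lt (lt_of_lt_of_le (lt_of_lt_of_le hlt inner.2) cont.2)⟩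
    else
      let cont := childrenB cs parent (i + 1) org
      ⟨cont.val, le_trans (Nat.le_succ i) cont.2⟩
  else ⟨(org, i), le_refl i⟩
termination_by cs.length - i
decreasing_by
  · exact Nat.sub_lt_sub_left h hlt
  · exact Nat.sub_lt_sub_left h (lt_of_lt_of_le hlt inner.2)
  · exact Nat.sub_lt_sub_left h (Nat.lt_succ_self i)

def parse_chart_alt (chart_string : String) : Int × (List (Int × List Int)) :=
  let cs := chart_string.toList
  let h0 := readIntB cs 0 0
  let org : PySem.Dict Int (PySem.Set Int) := PySem.Dict.empty.insert h0.1 PySem.Set.empty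
  (h0.1, (childrenB cs h0.1 h0.2 org).val.1.items)

-- ===== PRECONDITION & SPEC =====
-- chart well-formedness at root-stack depth d: only digits/' '/'('/')' occur, and at every
-- ')' and at the start of every number the root stack is non-empty; inRun marks being
-- inside a digit run (initially true: the leading head number pushes nothing)
def chk : List Char → Nat → Bool → Bool
  | [], _, _ => true
  | c :: rest, d, inRun =>
    if c = ' ' ∨ c = '(' then chk rest d false
    else if c = ')' then decide (1 ≤ d) && chk rest (d - 1) false
    else if c.isDigit then
      if inRun then chk rest d true
      else decide (1 ≤ d) && chk rest (d + 1) true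
    else false

-- Pre_ excludes exactly the inputs on which the Python A does not return: it raises
-- IndexError when a ')' or a number occurs while the root stack is empty, and it loops
-- forever on any character that is not a digit, ' ', '(' or ')'.
def Pre_parse_chart (chart_string : String) : Prop :=
  chk chart_string.toList 1 true = true
instance (chart_string : String) : Decidable (Pre_parse_chart chart_string) := by
  unfold Pre_parse_chart; infer_instance

def pvWitness_parse_chart : String := "1 (2 (4 5) 3)"

def Spec_parse_chart (chart_string : String) (out : Int × (List (Int × List Int))) : Prop := out = parse_chart_alt chart_string
instance (chart_string : String) (out : Int × (List (Int × List Int))) : Decidable (Spec_parse_chart chart_string out) := by unfold Spec_parse_chart; infer_instance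

-- ===== CLAIM (what is proved, stated in full; the proofs are below) =====
def Claim_equal_parse_chart : Prop := ∀ (chart_string : String), Dom_parse_chart chart_string → Pre_parse_chart chart_string → Spec_parse_chart chart_string (parse_chart chart_string)

-- ===== LEMMAS AND PROOFS =====

-- proof-side indexed versions of the checker
-- index after the decimal run starting at i (independent of both ports)
def skipDigits (cs : List Char) (i : Nat) : Nat :=
  if h : i < cs.length ∧ (cs.getD i ' ').isDigit then skipDigits cs (i + 1) else i
termination_by cs.length - i
decreasing_by exact Nat.sub_lt_sub_left h.1 (Nat.lt_succ_self i)

theorem skipDigits_le (cs : List Char) (i : Nat) : i ≤ skipDigits cs i := by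
  fun_induction skipDigits with
  | case1 i h ih => exact le_trans (Nat.le_succ i) ih
  | case2 i h => exact le_refl i

theorem skipDigits_lt (cs : List Char) (i : Nat) (h1 : i < cs.length)
    (h2 : (cs.getD i ' ').isDigit) : i < skipDigits cs i := by
  rw [skipDigits]
  simp only [h1, h2, and_self]
  exact lt_of_lt_of_le (Nat.lt_succ_self i) (skipDigits_le cs (i + 1))

-- chart well-formedness from position i at root-stack depth d: only digits/' '/'('/')'
-- occur, and at every ')' and at the start of every number the stack is non-empty
def chkAt (cs : List Char) (i : Nat) (d : Nat) : Bool :=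
  if h : i < cs.length then
    if cs.getD i ' ' = ' ' ∨ cs.getD i ' ' = '(' then chkAt cs (i + 1) d
    else if cs.getD i ' ' = ')' then decide (1 ≤ d) && chkAt cs (i + 1) (d - 1)
    else if hd : (cs.getD i ' ').isDigit then decide (1 ≤ d) && chkAt cs (skipDigits cs i) (d + 1)
    else false
  else true
termination_by cs.length - i
decreasing_by
  · exact Nat.sub_lt_sub_left h (Nat.lt_succ_self i)
  · exact Nat.sub_lt_sub_left h (Nat.lt_succ_self i)
  · exact Nat.sub_lt_sub_left h (skipDigits_lt cs i h hd)


theorem digit_ne (c : Char) (h : c.isDigit = true) : c ≠ ' ' ∧ c ≠ '(' ∧ c ≠ ')' := by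
  refine ⟨?_, ?_, ?_⟩ <;> rintro rfl <;> exact absurd h (by decide)

theorem readIntB_eq_nextInt (cs : List Char) (x : Int) (i : Nat) :
    readIntB cs x i = nextInt cs x i := by
  fun_induction readIntB with
  | case1 x i h ih => rw [nextInt]; simp only [h]; exact ih
  | case2 x i h => rw [nextInt]; simp only [h, reduceDIte]

theorem nextInt_snd_eq_skipDigits (cs : List Char) (x : Int) (i : Nat) :
    (nextInt cs x i).2 = skipDigits cs i := by
  fun_induction nextInt with
  | case1 x i h ih => rw [skipDigits]; simp only [h]; exact ih
  | case2 x i h => rw [skipDigits]; simp only [h, reduceDIte]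

theorem chkAt_of_le (cs : List Char) (i : Nat) (d : Nat) (h : cs.length ≤ i) :
    chkAt cs i d = true := by
  rw [chkAt]; simp only [Nat.not_lt.mpr h, reduceDIte]

-- step lemmas: chkAt unfolded once, per branch
theorem chkAt_space (cs : List Char) (i : Nat) (d : Nat) (h : i < cs.length)
    (hc : cs.getD i ' ' = ' ' ∨ cs.getD i ' ' = '(') :
    chkAt cs i d = chkAt cs (i + 1) d := by
  rw [chkAt]; rw [dif_pos h, if_pos hc]

theorem chkAt_close (cs : List Char) (i : Nat) (d : Nat) (h : i < cs.length)
    (hc : cs.getD i ' ' = ')') :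
    chkAt cs i d = (decide (1 ≤ d) && chkAt cs (i + 1) (d - 1)) := by
  rw [chkAt, dif_pos h, if_neg (by rw [hc]; decide), if_pos hc]

theorem chkAt_digit (cs : List Char) (i : Nat) (d : Nat) (h : i < cs.length)
    (hd : (cs.getD i ' ').isDigit = true) :
    chkAt cs i d = (decide (1 ≤ d) && chkAt cs (skipDigits cs i) (d + 1)) := by
  obtain ⟨h1, h2, h3⟩ := digit_ne _ hd
  rw [chkAt, dif_pos h, if_neg (not_or.mpr ⟨h1, h2⟩), if_neg h3, dif_pos hd]

theorem chkAt_bad (cs : List Char) (i : Nat) (d : Nat) (h : i < cs.length)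
    (hc : ¬(cs.getD i ' ' = ' ' ∨ cs.getD i ' ' = '(')) (hc2 : cs.getD i ' ' ≠ ')')
    (hd : ¬(cs.getD i ' ').isDigit = true) :
    chkAt cs i d = false := by
  rw [chkAt, dif_pos h, if_neg hc, if_neg hc2, dif_neg hd]

-- step lemmas: childrenB unfolded once, per branch
theorem childrenB_end (cs : List Char) (p : Int) (i : Nat) (org : PySem.Dict Int (PySem.Set Int))
    (h : ¬ i < cs.length) : (childrenB cs p i org).val = (org, i) := by
  rw [childrenB, dif_neg h]

theorem childrenB_close (cs : List Char) (p : Int) (i : Nat) (org : PySem.Dict Int (PySem.Set Int))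
    (h : i < cs.length) (hc : cs.getD i ' ' = ')') :
    (childrenB cs p i org).val = (org, i + 1) := by
  rw [childrenB, dif_pos h, dif_pos hc]

theorem childrenB_digit (cs : List Char) (p : Int) (i : Nat) (org : PySem.Dict Int (PySem.Set Int))
    (h : i < cs.length) (hd : (cs.getD i ' ').isDigit = true) :
    (childrenB cs p i org).val =
      (childrenB cs p
        (childrenB cs (readIntB cs 0 i).1 (readIntB cs 0 i).2
          (org.modify p PySem.Set.empty (fun s => PySem.Set.add s (readIntB cs 0 i).1))).val.2
        (childrenB cs (readIntB cs 0 i).1 (readIntB cs 0 i).2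
          (org.modify p PySem.Set.empty (fun s => PySem.Set.add s (readIntB cs 0 i).1))).val.1).val := by
  obtain ⟨_, _, h3⟩ := digit_ne _ hd
  rw [childrenB, dif_pos h, dif_neg h3, dif_pos hd]

theorem childrenB_skip (cs : List Char) (p : Int) (i : Nat) (org : PySem.Dict Int (PySem.Set Int))
    (h : i < cs.length) (hc : cs.getD i ' ' ≠ ')') (hd : ¬(cs.getD i ' ').isDigit = true) :
    (childrenB cs p i org).val = (childrenB cs p (i + 1) org).val := by
  rw [childrenB, dif_pos h, dif_neg hc, dif_neg hd]

-- step lemmas: loopA unfolded once, per branch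
theorem loopA_end (cs : List Char) (it : Nat) (org : PySem.Dict Int (PySem.Set Int))
    (roots : List Int) (h : ¬ it < cs.length) : loopA cs it org roots = org := by
  rw [loopA, dif_neg h]

theorem loopA_space (cs : List Char) (it : Nat) (org : PySem.Dict Int (PySem.Set Int))
    (roots : List Int) (h : it < cs.length)
    (hc : cs.getD it ' ' = ' ' ∨ cs.getD it ' ' = '(') :
    loopA cs it org roots = loopA cs (it + 1) org roots := by
  rcases hc with hc | hc
  · rw [loopA, dif_pos h, if_pos hc]
  · rw [loopA, dif_pos h]
    by_cases hs : cs.getD it ' ' = ' '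
    · rw [if_pos hs]
    · rw [if_neg hs, if_pos hc]

theorem loopA_close (cs : List Char) (it : Nat) (org : PySem.Dict Int (PySem.Set Int))
    (roots : List Int) (h : it < cs.length) (hc : cs.getD it ' ' = ')') :
    loopA cs it org roots = loopA cs (it + 1) org roots.dropLast := by
  rw [loopA, dif_pos h, if_neg (by rw [hc]; decide), if_neg (by rw [hc]; decide), if_pos hc]

theorem nextInt_lt (cs : List Char) (x : Int) (i : Nat) (h1 : i < cs.length)
    (h2 : (cs.getD i ' ').isDigit) : i < (nextInt cs x i).2 := by
  rw [← readIntB_eq_nextInt]; exact readIntB_lt cs x i h1 h2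

theorem loopA_digit (cs : List Char) (it : Nat) (org : PySem.Dict Int (PySem.Set Int))
    (rs : List Int) (p : Int) (h : it < cs.length) (hd : (cs.getD it ' ').isDigit = true) :
    loopA cs it org (rs ++ [p]) =
      loopA cs (nextInt cs 0 it).2
        (org.insert p (PySem.Set.add (org.getD p PySem.Set.empty) (nextInt cs 0 it).1))
        ((rs ++ [p]) ++ [(nextInt cs 0 it).1]) := by
  obtain ⟨h1, h2, h3⟩ := digit_ne _ hd
  rw [loopA, dif_pos h, if_neg h1, if_neg h2, if_neg h3, dif_pos (nextInt_lt cs 0 it h hd)]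
  rw [List.getLast?_concat]

-- the checker is preserved through one children() call, one depth lower afterwards
theorem chk_children (cs : List Char) : ∀ (n : Nat) (p : Int) (i : Nat)
    (org : PySem.Dict Int (PySem.Set Int)) (d : Nat), cs.length - i ≤ n →
    chkAt cs i (d + 1) = true →
    chkAt cs (childrenB cs p i org).val.2 d = true := by
  intro n
  induction n with
  | zero =>
    intro p i org d hn hchk
    rw [childrenB_end cs p i org (by omega)]
    exact chkAt_of_le cs i d (by omega)
  | succ n ih =>
    intro p i org d hn hchk
    by_cases h : i < cs.length
    · by_cases hc : cs.getD i ' ' = ')'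
      · rw [childrenB_close cs p i org h hc]
        rw [chkAt_close cs i (d + 1) h hc] at hchk
        simpa using hchk
      · by_cases hd : (cs.getD i ' ').isDigit = true
        · rw [childrenB_digit cs p i org h hd]
          rw [chkAt_digit cs i (d + 1) h hd] at hchk
          simp only [Bool.and_eq_true, decide_eq_true_eq] at hchk
          have hskip : skipDigits cs i = (readIntB cs 0 i).2 := by
            rw [readIntB_eq_nextInt, nextInt_snd_eq_skipDigits]
          have hlt := readIntB_lt cs 0 i h hd
          have h1 := ih (readIntB cs 0 i).1 (readIntB cs 0 i).2
            (org.modify p PySem.Set.empty (fun s => PySem.Set.add s (readIntB cs 0 i).1))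
            (d + 1) (by omega) (by rw [← hskip]; exact hchk.2)
          have hin := (childrenB cs (readIntB cs 0 i).1 (readIntB cs 0 i).2
            (org.modify p PySem.Set.empty (fun s => PySem.Set.add s (readIntB cs 0 i).1))).2
          exact ih p _ _ d (by omega) h1
        · rw [childrenB_skip cs p i org h hc hd]
          by_cases hsp : cs.getD i ' ' = ' ' ∨ cs.getD i ' ' = '('
          · rw [chkAt_space cs i (d + 1) h hsp] at hchk
            exact ih p (i + 1) org d (by omega) hchk
          · rw [chkAt_bad cs i (d + 1) h hsp hc hd] at hchk
            exact absurd hchk (by simp)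
    · rw [childrenB_end cs p i org h]
      exact chkAt_of_le cs i d (by omega)

theorem sim (cs : List Char) : ∀ (n it : Nat) (org : PySem.Dict Int (PySem.Set Int))
    (rs : List Int) (p : Int), cs.length - it ≤ n →
    chkAt cs it (rs.length + 1) = true →
    loopA cs it org (rs ++ [p]) =
      loopA cs (childrenB cs p it org).val.2 (childrenB cs p it org).val.1 rs := by
  intro n
  induction n with
  | zero =>
    intro it org rs p hn hchk
    have h : ¬ it < cs.length := by omega
    rw [childrenB_end cs p it org h, loopA_end cs it org _ h, loopA_end cs it org rs h]
  | succ n ih =>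
    intro it org rs p hn hchk
    by_cases h : it < cs.length
    · by_cases hc : cs.getD it ' ' = ')'
      · rw [childrenB_close cs p it org h hc, loopA_close cs it org _ h hc,
          List.dropLast_concat]
      · by_cases hd : (cs.getD it ' ').isDigit = true
        · rw [childrenB_digit cs p it org h hd]
          rw [loopA_digit cs it org rs p h hd]
          rw [← readIntB_eq_nextInt]
          have hskip : skipDigits cs it = (readIntB cs 0 it).2 := by
            rw [readIntB_eq_nextInt, nextInt_snd_eq_skipDigits]
          rw [chkAt_digit cs it (rs.length + 1) h hd] at hchk
          simp only [Bool.and_eq_true, decide_eq_true_eq] at hchk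
          have hlt := readIntB_lt cs 0 it h hd
          have hmod : org.insert p (PySem.Set.add (org.getD p PySem.Set.empty) (readIntB cs 0 it).1)
              = org.modify p PySem.Set.empty (fun s => PySem.Set.add s (readIntB cs 0 it).1) := rfl
          rw [hmod]
          have hchk2 : chkAt cs (readIntB cs 0 it).2 ((rs ++ [p]).length + 1) = true := by
            rw [← hskip]
            simpa using hchk.2
          have h1 := ih (readIntB cs 0 it).2
            (org.modify p PySem.Set.empty (fun s => PySem.Set.add s (readIntB cs 0 it).1))
            (rs ++ [p]) (readIntB cs 0 it).1 (by omega) hchk2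
          rw [h1]
          have hin := (childrenB cs (readIntB cs 0 it).1 (readIntB cs 0 it).2
            (org.modify p PySem.Set.empty (fun s => PySem.Set.add s (readIntB cs 0 it).1))).2
          have hchk3 : chkAt cs (childrenB cs (readIntB cs 0 it).1 (readIntB cs 0 it).2
              (org.modify p PySem.Set.empty (fun s => PySem.Set.add s (readIntB cs 0 it).1))).val.2
              (rs.length + 1) = true := by
            have := chk_children cs cs.length (readIntB cs 0 it).1 (readIntB cs 0 it).2
              (org.modify p PySem.Set.empty (fun s => PySem.Set.add s (readIntB cs 0 it).1))
              (rs.length + 1) (by omega) (by rw [← hskip]; exact hchk.2)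
            exact this
          exact ih _ _ rs p (by omega) hchk3
        · by_cases hsp : cs.getD it ' ' = ' ' ∨ cs.getD it ' ' = '('
          · rw [childrenB_skip cs p it org h hc hd,
              loopA_space cs it org _ h hsp]
            rw [chkAt_space cs it (rs.length + 1) h hsp] at hchk
            exact ih (it + 1) org rs p (by omega) hchk
          · rw [chkAt_bad cs it (rs.length + 1) h hsp hc hd] at hchk
            exact absurd hchk (by simp)
    · rw [childrenB_end cs p it org h, loopA_end cs it org _ h, loopA_end cs it org rs h]

theorem loop_nil (cs : List Char) : ∀ (n it : Nat) (org : PySem.Dict Int (PySem.Set Int)),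
    cs.length - it ≤ n → chkAt cs it 0 = true → loopA cs it org [] = org := by
  intro n
  induction n with
  | zero =>
    intro it org hn hchk
    exact loopA_end cs it org [] (by omega)
  | succ n ih =>
    intro it org hn hchk
    by_cases h : it < cs.length
    · by_cases hsp : cs.getD it ' ' = ' ' ∨ cs.getD it ' ' = '('
      · rw [loopA_space cs it org [] h hsp]
        rw [chkAt_space cs it 0 h hsp] at hchk
        exact ih (it + 1) org (by omega) hchk
      · by_cases hc : cs.getD it ' ' = ')'
        · rw [chkAt_close cs it 0 h hc] at hchk
          exact absurd hchk (by simp)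
        · by_cases hd : (cs.getD it ' ').isDigit = true
          · rw [chkAt_digit cs it 0 h hd] at hchk
            exact absurd hchk (by simp)
          · rw [chkAt_bad cs it 0 h hsp hc hd] at hchk
            exact absurd hchk (by simp)
    · exact loopA_end cs it org [] h

theorem skipDigits_of_digit (cs : List Char) (i : Nat) (h : i < cs.length)
    (hd : (cs.getD i ' ').isDigit = true) : skipDigits cs i = skipDigits cs (i + 1) := by
  rw [skipDigits]; simp only [h, hd, and_self, reduceDIte]

theorem skipDigits_of_stop (cs : List Char) (i : Nat)
    (h : ¬(i < cs.length ∧ (cs.getD i ' ').isDigit = true)) : skipDigits cs i = i := by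
  rw [skipDigits]; simp only [h, reduceDIte]

theorem drop_cons_getD (cs : List Char) (i : Nat) (h : i < cs.length) :
    cs.drop i = cs.getD i ' ' :: cs.drop (i + 1) := by
  rw [List.getD_eq_getElem cs ' ' h]
  exact List.drop_eq_getElem_cons h

-- the structural checker of Pre_ agrees with the indexed checker of the proofs
theorem chk_eq_chkAt (cs : List Char) : ∀ (n i d : Nat), cs.length - i ≤ n →
    chk (cs.drop i) d false = chkAt cs i d ∧
    chk (cs.drop i) d true = chkAt cs (skipDigits cs i) d := by
  intro n
  induction n with
  | zero =>
    intro i d hn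
    have h : ¬ i < cs.length := by omega
    have hd : cs.drop i = [] := List.drop_eq_nil_of_le (by omega)
    have hs : skipDigits cs i = i := skipDigits_of_stop cs i (by tauto)
    rw [hd, hs]
    exact ⟨(chkAt_of_le cs i d (by omega)).symm, (chkAt_of_le cs i d (by omega)).symm⟩
  | succ n ih =>
    intro i d hn
    by_cases h : i < cs.length
    · rw [drop_cons_getD cs i h]
      by_cases hsp : cs.getD i ' ' = ' ' ∨ cs.getD i ' ' = '('
      · have hnd : ¬ (cs.getD i ' ').isDigit = true := by
          rcases hsp with hc | hc <;> rw [hc] <;> decide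
        have hs : skipDigits cs i = i := skipDigits_of_stop cs i (by tauto)
        have hstep : ∀ b : Bool, chk (cs.getD i ' ' :: cs.drop (i + 1)) d b =
            chk (cs.drop (i + 1)) d false := by
          intro b; rw [chk]; rw [if_pos hsp]
        constructor
        · rw [hstep, (ih (i + 1) d (by omega)).1, chkAt_space cs i d h hsp]
        · rw [hstep, (ih (i + 1) d (by omega)).1, hs, chkAt_space cs i d h hsp]
      · by_cases hc : cs.getD i ' ' = ')'
        · have hnd : ¬ (cs.getD i ' ').isDigit = true := by rw [hc]; decide
          have hs : skipDigits cs i = i := skipDigits_of_stop cs i (by tauto)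
          have hstep : ∀ b : Bool, chk (cs.getD i ' ' :: cs.drop (i + 1)) d b =
              (decide (1 ≤ d) && chk (cs.drop (i + 1)) (d - 1) false) := by
            intro b; rw [chk]; rw [if_neg hsp, if_pos hc]
          constructor
          · rw [hstep, (ih (i + 1) (d - 1) (by omega)).1, chkAt_close cs i d h hc]
          · rw [hstep, (ih (i + 1) (d - 1) (by omega)).1, hs, chkAt_close cs i d h hc]
        · by_cases hd : (cs.getD i ' ').isDigit = true
          · have hs : skipDigits cs i = skipDigits cs (i + 1) := skipDigits_of_digit cs i h hd
            constructor
            · rw [chk]; rw [if_neg hsp, if_neg hc, if_pos hd, if_neg (by simp)]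
              rw [(ih (i + 1) (d + 1) (by omega)).2, chkAt_digit cs i d h hd, hs]
            · rw [chk]; rw [if_neg hsp, if_neg hc, if_pos hd, if_pos rfl]
              rw [(ih (i + 1) d (by omega)).2, hs]
          · have hs : skipDigits cs i = i := skipDigits_of_stop cs i (by tauto)
            have hstep : ∀ b : Bool, chk (cs.getD i ' ' :: cs.drop (i + 1)) d b = false := by
              intro b; rw [chk]; rw [if_neg hsp, if_neg hc, if_neg hd]
            constructor
            · rw [hstep, chkAt_bad cs i d h hsp hc hd]
            · rw [hstep, hs, chkAt_bad cs i d h hsp hc hd]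
    · have hd : cs.drop i = [] := List.drop_eq_nil_of_le (by omega)
      have hs : skipDigits cs i = i := skipDigits_of_stop cs i (by tauto)
      rw [hd, hs]
      exact ⟨(chkAt_of_le cs i d (by omega)).symm, (chkAt_of_le cs i d (by omega)).symm⟩

-- ===== VERDICT (by name: the statement is the Claim_ definition above) =====
theorem parse_chart_spec : Claim_equal_parse_chart := by
  intro s _ hpre
  unfold Spec_parse_chart parse_chart parse_chart_alt
  dsimp only
  rw [readIntB_eq_nextInt]
  have hskip0 : (nextInt s.toList 0 0).2 = skipDigits s.toList 0 :=
    nextInt_snd_eq_skipDigits s.toList 0 0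
  have hchk : chkAt s.toList (nextInt s.toList 0 0).2 1 = true := by
    rw [hskip0, ← (chk_eq_chkAt s.toList s.toList.length 0 1 (by omega)).2,
      List.drop_zero]
    exact hpre
  have h1 := sim s.toList s.toList.length (nextInt s.toList 0 0).2
    (PySem.Dict.empty.insert (nextInt s.toList 0 0).1 PySem.Set.empty)
    [] (nextInt s.toList 0 0).1 (by omega) (by simpa using hchk)
  have h2 := chk_children s.toList s.toList.length (nextInt s.toList 0 0).1
    (nextInt s.toList 0 0).2
    (PySem.Dict.empty.insert (nextInt s.toList 0 0).1 PySem.Set.empty)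
    0 (by omega) (by simpa using hchk)
  set c := childrenB s.toList (nextInt s.toList 0 0).1 (nextInt s.toList 0 0).2
    (PySem.Dict.empty.insert (nextInt s.toList 0 0).1 PySem.Set.empty) with hcdef
  have h3 := loop_nil s.toList s.toList.length c.val.2 c.val.1 (by omega) h2
  simp only [List.nil_append] at h1
  rw [h1, h3]
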